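-- pv_equiv track=rewrite | github.com/ShubhamKumaR-96/DSA_with_Python | Array/4.subarray/cntGoodSubArr.py | cntGoodSubArr
-- ===== SOURCE A (Python) =====
-- def cntGoodSubArr(A, B):
--     n = len(A)
--     cnt = 0
--     for i in range(n):
--         curr_sum = 0
--         for j in range(i, n):
--             curr_sum += A[j]
--             length = j - i + 1
--             if (length % 2 == 0 and curr_sum < B) or (length % 2 != 0 and curr_sum > B):
--                 cnt += 1
--     return cnt
-- ===== SOURCE B (Python) =====
-- def cntGoodSubArr(A, B):
--     # prefix-sum reformulation: subarray A[i:j] is good iff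
--     # P[i] > P[j] - B when i and j have equal parity, else P[i] < P[j] - B
--     evens, odds = [0], []      # prefix sums at even / odd prefix indices seen so far
--     P = j = cnt = 0
--     for x in A:
--         P += x
--         j += 1
--         t = P - B
--         same, other = (evens, odds) if j % 2 == 0 else (odds, evens)
--         cnt += sum(1 for v in same if v > t)
--         cnt += sum(1 for v in other if v < t)
--         same.append(P)
--     return cnt
-- ===== Notes on version B (the rewrite author's own statement) =====
-- stated objective: alternative
-- what changed: Replaces the nested i/j loops with running subarray sums by a single left-to-right pass over prefix sums that keeps two buckets of earlier prefix values split by index parity and, for each position, counts earlier prefixes above/below the threshold P-B.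
import Mathlib
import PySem

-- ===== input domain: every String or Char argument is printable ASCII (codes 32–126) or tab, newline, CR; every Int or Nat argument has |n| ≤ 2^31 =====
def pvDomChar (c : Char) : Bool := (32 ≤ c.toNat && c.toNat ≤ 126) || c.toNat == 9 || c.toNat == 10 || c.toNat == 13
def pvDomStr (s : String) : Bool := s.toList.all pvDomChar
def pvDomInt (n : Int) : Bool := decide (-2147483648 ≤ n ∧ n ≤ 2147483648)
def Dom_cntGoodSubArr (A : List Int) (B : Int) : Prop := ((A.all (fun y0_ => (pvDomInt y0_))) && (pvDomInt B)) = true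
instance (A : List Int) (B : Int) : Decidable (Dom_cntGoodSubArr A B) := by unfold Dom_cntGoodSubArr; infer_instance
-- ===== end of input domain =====

-- B replaces A's nested loops (running sum per start index) by one pass over prefix
-- sums with two parity buckets and threshold comparisons; objective: alternative.

-- ===== PORT A =====
def cntGoodSubArr (A : List Int) (B : Int) : Int :=
  let n : Int := A.length
  (PySem.List.pyRange 0 n 1).foldl (fun cnt i =>
    ((PySem.List.pyRange i n 1).foldl (fun (st : Int × Int) j =>
        let curr_sum := st.1 + PySem.List.pyGetD A j 0
        let length := j - i + 1
        if (PySem.Int.mod length 2 = 0 ∧ curr_sum < B) ∨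
           (PySem.Int.mod length 2 ≠ 0 ∧ B < curr_sum)
        then (curr_sum, st.2 + 1) else (curr_sum, st.2))
      (0, cnt)).2) 0

-- ===== PORT B =====
def cntGoodSubArr_alt (A : List Int) (B : Int) : Int :=
  (A.foldl (fun (st : List Int × List Int × Int × Int × Int) x =>
      let evens := st.1
      let odds := st.2.1
      let P := st.2.2.1 + x
      let j := st.2.2.2.1 + 1
      let t := P - B
      if PySem.Int.mod j 2 = 0 then
        (evens ++ [P], odds, P, j,
          st.2.2.2.2 + (evens.countP (fun v => decide (t < v)) : Int)
                     + (odds.countP (fun v => decide (v < t)) : Int))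
      else
        (evens, odds ++ [P], P, j,
          st.2.2.2.2 + (odds.countP (fun v => decide (t < v)) : Int)
                     + (evens.countP (fun v => decide (v < t)) : Int)))
    ([0], [], 0, 0, 0)).2.2.2.2

-- ===== PRECONDITION & SPEC =====
def Spec_cntGoodSubArr (A : List Int) (B : Int) (out : Int) : Prop := out = cntGoodSubArr_alt A B
instance (A : List Int) (B : Int) (out : Int) : Decidable (Spec_cntGoodSubArr A B out) := by unfold Spec_cntGoodSubArr; infer_instance

-- ===== CLAIM (what is proved, stated in full; the proofs are below) =====
def Claim_equal_cntGoodSubArr : Prop := ∀ (A : List Int) (B : Int), Dom_cntGoodSubArr A B → Spec_cntGoodSubArr A B (cntGoodSubArr A B)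

-- ===== LEMMAS AND PROOFS =====

def pvPf (A : List Int) (k : Nat) : Int := (A.take k).sum

-- contribution of the pair i < j of prefix indices (subarray A[i:j])
def pvC (A : List Int) (B : Int) (i j : Nat) : Int :=
  if ((j : Int) - (i : Int)) % 2 = 0 then
    (if pvPf A j - pvPf A i < B then 1 else 0)
  else
    (if B < pvPf A j - pvPf A i then 1 else 0)

-- the common total both programs compute
def pvTot (A : List Int) (B : Int) : Int :=
  ∑ j ∈ Finset.range (A.length + 1), ∑ i ∈ Finset.range j, pvC A B i j
theorem pvA_inner (A : List Int) (B : Int) (i : Nat) (c0 : Int) (b : Nat) (hib : i ≤ b) :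
  b ≤ A.length →
  ((PySem.List.pyRange (i:Int) (b:Int) 1).foldl (fun (st : Int × Int) j =>
      let curr_sum := st.1 + PySem.List.pyGetD A j 0
      let length := j - (i:Int) + 1
      if (PySem.Int.mod length 2 = 0 ∧ curr_sum < B) ∨
         (PySem.Int.mod length 2 ≠ 0 ∧ B < curr_sum)
      then (curr_sum, st.2 + 1) else (curr_sum, st.2))
    (0, c0)) = (pvPf A b - pvPf A i, c0 + ∑ j ∈ Finset.Ico (i+1) (b+1), pvC A B i j) := by
  induction b, hib using Nat.le_induction with
  | base =>
      intro _
      rw [PySem.List.pyRange_one_eq_nil (by omega)]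
      simp [pvPf]
  | succ b hib ih =>
      intro hb1
      have hb : b < A.length := by omega
      have hc : ((b+1 : Nat) : Int) = (b : Int) + 1 := by push_cast; ring
      rw [hc, PySem.List.pyRange_one_succ_right (by exact_mod_cast hib), List.foldl_append,
        ih (by omega)]
      simp only [List.foldl_cons, List.foldl_nil]
      have hget : PySem.List.pyGetD A (b : Int) 0 = A[b] := by
        rw [PySem.List.pyGetD_natCast]; exact List.getD_eq_getElem A 0 hb
      have hPf : pvPf A (b+1) = pvPf A b + A[b] := by
        simpa [pvPf] using List.sum_take_succ A b hb
      have hmod : PySem.Int.mod ((b:Int) - (i:Int) + 1) 2 = ((b:Int) - (i:Int) + 1) % 2 :=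
        PySem.Int.mod_eq_emod_of_pos (by norm_num)
      have hsum : ∑ j ∈ Finset.Ico (i+1) (b+1+1), pvC A B i j
          = (∑ j ∈ Finset.Ico (i+1) (b+1), pvC A B i j) + pvC A B i (b+1) :=
        Finset.sum_Ico_succ_top (by omega) _
      rw [hsum]
      simp only [hget, hmod]
      have hpar : (((b:Int) - (i:Int) + 1) % 2 = 0) ↔ (((b+1 : Nat):Int) - (i:Int)) % 2 = 0 := by
        push_cast; constructor <;> intro h <;> omega
      have hcurr : pvPf A b - pvPf A i + A[b] = pvPf A (b+1) - pvPf A i := by rw [hPf]; ring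
      have hC : pvC A B i (b+1) =
          if (((b:Int) - (i:Int) + 1) % 2 = 0 ∧ pvPf A b - pvPf A i + A[b] < B) ∨
             (¬(((b:Int) - (i:Int) + 1) % 2 = 0) ∧ B < pvPf A b - pvPf A i + A[b]) then 1 else 0 := by
        unfold pvC
        rw [hcurr]
        push_cast
        split_ifs <;> omega
      rw [hC]
      split_ifs with h <;> refine Prod.ext ?_ ?_ <;> simp [hPf] <;> ring

theorem pvA_outer (A : List Int) (B : Int) (m : Nat) (hm : m ≤ A.length) (c : Int) :
  ((PySem.List.pyRange 0 (m:Int) 1).foldl (fun cnt i =>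
    ((PySem.List.pyRange i (A.length:Int) 1).foldl (fun (st : Int × Int) j =>
        let curr_sum := st.1 + PySem.List.pyGetD A j 0
        let length := j - i + 1
        if (PySem.Int.mod length 2 = 0 ∧ curr_sum < B) ∨
           (PySem.Int.mod length 2 ≠ 0 ∧ B < curr_sum)
        then (curr_sum, st.2 + 1) else (curr_sum, st.2))
      (0, cnt)).2) c)
  = c + ∑ i ∈ Finset.range m, ∑ j ∈ Finset.Ico (i+1) (A.length+1), pvC A B i j := by
  induction m with
  | zero => simp [PySem.List.pyRange_one_eq_nil]
  | succ m ih =>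
      have hc : ((m+1 : Nat) : Int) = (m : Int) + 1 := by push_cast; ring
      rw [hc, PySem.List.pyRange_one_succ_right (by exact_mod_cast Nat.zero_le m),
        List.foldl_append, ih (by omega)]
      simp only [List.foldl_cons, List.foldl_nil]
      rw [pvA_inner A B m _ A.length (by omega) (le_refl _), Finset.sum_range_succ]
      ring

theorem pvA_eq_tot (A : List Int) (B : Int) : cntGoodSubArr A B = pvTot A B := by
  unfold cntGoodSubArr
  rw [pvA_outer A B A.length (le_refl _) 0, pvTot]
  rw [Finset.sum_comm' (s' := fun j => Finset.range j) (t' := Finset.range (A.length+1))]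
  · ring_nf
  · intro i j
    simp only [Finset.mem_range, Finset.mem_Ico]
    omega

def pvEv (A : List Int) : List Int :=
  ((List.range (A.length+1)).filter (fun k => k % 2 == 0)).map (pvPf A)
def pvOd (A : List Int) : List Int :=
  ((List.range (A.length+1)).filter (fun k => !(k % 2 == 0))).map (pvPf A)

theorem pvCount (m : Nat) (p : Nat → Bool) :
    (((List.range m).countP p : Nat) : Int) = ∑ k ∈ Finset.range m, (if p k then (1:Int) else 0) := by
  induction m with
  | zero => simp
  | succ m ih =>
      rw [List.range_succ, List.countP_append, Finset.sum_range_succ, ← ih]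
      cases hpm : p m <;> simp [hpm]

set_option maxHeartbeats 1000000 in
theorem pvB_fold (A : List Int) (B : Int) :
    (A.foldl (fun (st : List Int × List Int × Int × Int × Int) x =>
      let evens := st.1
      let odds := st.2.1
      let P := st.2.2.1 + x
      let j := st.2.2.2.1 + 1
      let t := P - B
      if PySem.Int.mod j 2 = 0 then
        (evens ++ [P], odds, P, j,
          st.2.2.2.2 + (evens.countP (fun v => decide (t < v)) : Int)
                     + (odds.countP (fun v => decide (v < t)) : Int))
      else
        (evens, odds ++ [P], P, j,
          st.2.2.2.2 + (odds.countP (fun v => decide (t < v)) : Int)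
                     + (evens.countP (fun v => decide (v < t)) : Int)))
    ([0], [], 0, 0, 0)) = (pvEv A, pvOd A, A.sum, (A.length : Int), pvTot A B) := by
  induction A using List.reverseRecOn with
  | nil => simp [pvEv, pvOd, pvTot, pvPf]
  | append_singleton xs x ih =>
      rw [List.foldl_append, ih]
      simp only [List.foldl_cons, List.foldl_nil]
      have hmod : PySem.Int.mod ((xs.length:Int) + 1) 2 = ((xs.length:Int) + 1) % 2 :=
        PySem.Int.mod_eq_emod_of_pos (by norm_num)
      have hlen : (xs ++ [x]).length = xs.length + 1 := by simp
      have hPfa : ∀ k, k ≤ xs.length → pvPf (xs ++ [x]) k = pvPf xs k := by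
        intro k hk; unfold pvPf; rw [List.take_append_of_le_length (by omega)]
      have hPtop : pvPf (xs ++ [x]) (xs.length+1) = xs.sum + x := by
        unfold pvPf
        rw [List.take_of_length_le (by simp), List.sum_append]; simp
      have hTot : pvTot (xs ++ [x]) B
          = pvTot xs B + ∑ i ∈ Finset.range (xs.length+1), pvC (xs++[x]) B i (xs.length+1) := by
        unfold pvTot
        rw [hlen, Finset.sum_range_succ]
        congr 1
        apply Finset.sum_congr rfl
        intro j hj
        apply Finset.sum_congr rfl
        intro i hi
        simp only [Finset.mem_range] at hj hi
        unfold pvC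
        rw [hPfa i (by omega), hPfa j (by omega)]
      have hcntE : (((pvEv xs).countP (fun v => decide (xs.sum + x - B < v)) : Nat) : Int)
          = ∑ k ∈ Finset.range (xs.length+1),
              (if (decide (xs.sum + x - B < pvPf xs k) && (k % 2 == 0)) then (1:Int) else 0) := by
        unfold pvEv
        rw [List.countP_map, List.countP_filter]
        exact pvCount (xs.length+1) _
      have hcntO : (((pvOd xs).countP (fun v => decide (v < xs.sum + x - B)) : Nat) : Int)
          = ∑ k ∈ Finset.range (xs.length+1),
              (if (decide (pvPf xs k < xs.sum + x - B) && !(k % 2 == 0)) then (1:Int) else 0) := by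
        unfold pvOd
        rw [List.countP_map, List.countP_filter]
        exact pvCount (xs.length+1) _
      have hcntE' : (((pvEv xs).countP (fun v => decide (v < xs.sum + x - B)) : Nat) : Int)
          = ∑ k ∈ Finset.range (xs.length+1),
              (if (decide (pvPf xs k < xs.sum + x - B) && (k % 2 == 0)) then (1:Int) else 0) := by
        unfold pvEv
        rw [List.countP_map, List.countP_filter]
        exact pvCount (xs.length+1) _
      have hcntO' : (((pvOd xs).countP (fun v => decide (xs.sum + x - B < v)) : Nat) : Int)
          = ∑ k ∈ Finset.range (xs.length+1),
              (if (decide (xs.sum + x - B < pvPf xs k) && !(k % 2 == 0)) then (1:Int) else 0) := by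
        unfold pvOd
        rw [List.countP_map, List.countP_filter]
        exact pvCount (xs.length+1) _
      by_cases hp : ((xs.length:Int) + 1) % 2 = 0
      · have hpN : (xs.length + 1) % 2 = 0 := by omega
        have hEv : pvEv (xs++[x]) = pvEv xs ++ [xs.sum + x] := by
          unfold pvEv
          rw [hlen, List.range_succ, List.filter_append, List.map_append]
          congr 1
          · exact List.map_congr_left (fun k hk => hPfa k (by
              have := List.mem_range.mp (List.mem_of_mem_filter hk); omega))
          · have hf : List.filter (fun k => (k % 2 == 0)) [xs.length+1] = [xs.length+1] := by
              simp [hpN]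
            rw [hf]
            simp [hPtop]
        have hOd : pvOd (xs++[x]) = pvOd xs := by
          unfold pvOd
          rw [hlen, List.range_succ, List.filter_append]
          have : List.filter (fun k => !(k % 2 == 0)) [xs.length+1] = [] := by simp [hpN]
          rw [this, List.append_nil]
          exact List.map_congr_left (fun k hk => hPfa k (by
            have := List.mem_range.mp (List.mem_of_mem_filter hk); omega))
        have hcol : (∑ i ∈ Finset.range (xs.length+1), pvC (xs++[x]) B i (xs.length+1))
            = (((pvEv xs).countP (fun v => decide (xs.sum + x - B < v)) : Nat) : Int)
              + (((pvOd xs).countP (fun v => decide (v < xs.sum + x - B)) : Nat) : Int) := by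
          rw [hcntE, hcntO, ← Finset.sum_add_distrib]
          apply Finset.sum_congr rfl
          intro k hk
          have hk' : k ≤ xs.length := by
            have := Finset.mem_range.mp hk; omega
          unfold pvC
          rw [hPfa k hk', hPtop]
          have e1 : (xs.sum + x - pvPf xs k < B) ↔ (xs.sum + x - B < pvPf xs k) := by omega
          have e2 : (B < xs.sum + x - pvPf xs k) ↔ (pvPf xs k < xs.sum + x - B) := by omega
          have hpar : ((((xs.length+1:Nat)):Int) - (k:Int)) % 2 = 0 ↔ k % 2 = 0 := by omega
          rcases Nat.mod_two_eq_zero_or_one k with hke | hke <;>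
            by_cases h1 : xs.sum + x - B < pvPf xs k <;>
            by_cases h2 : pvPf xs k < xs.sum + x - B <;>
              simp [e1, e2, hke, h1, h2] <;> omega
        rw [hmod, if_pos hp, hEv, hOd, hTot, hcol]
        simp [add_assoc]
      · have hpN : ¬ (xs.length + 1) % 2 = 0 := by omega
        have hEv : pvEv (xs++[x]) = pvEv xs := by
          unfold pvEv
          rw [hlen, List.range_succ, List.filter_append]
          have : List.filter (fun k => (k % 2 == 0)) [xs.length+1] = [] := by simp [(by omega : (xs.length + 1) % 2 = 1)]
          rw [this, List.append_nil]
          exact List.map_congr_left (fun k hk => hPfa k (by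
            have := List.mem_range.mp (List.mem_of_mem_filter hk); omega))
        have hOd : pvOd (xs++[x]) = pvOd xs ++ [xs.sum + x] := by
          unfold pvOd
          rw [hlen, List.range_succ, List.filter_append, List.map_append]
          congr 1
          · exact List.map_congr_left (fun k hk => hPfa k (by
              have := List.mem_range.mp (List.mem_of_mem_filter hk); omega))
          · have hf : List.filter (fun k => !(k % 2 == 0)) [xs.length+1] = [xs.length+1] := by
              simp [(by omega : (xs.length + 1) % 2 = 1)]
            rw [hf]
            simp [hPtop]
        have hcol : (∑ i ∈ Finset.range (xs.length+1), pvC (xs++[x]) B i (xs.length+1))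
            = (((pvOd xs).countP (fun v => decide (xs.sum + x - B < v)) : Nat) : Int)
              + (((pvEv xs).countP (fun v => decide (v < xs.sum + x - B)) : Nat) : Int) := by
          rw [hcntO', hcntE', ← Finset.sum_add_distrib]
          apply Finset.sum_congr rfl
          intro k hk
          have hk' : k ≤ xs.length := by
            have := Finset.mem_range.mp hk; omega
          unfold pvC
          rw [hPfa k hk', hPtop]
          have e1 : (xs.sum + x - pvPf xs k < B) ↔ (xs.sum + x - B < pvPf xs k) := by omega
          have e2 : (B < xs.sum + x - pvPf xs k) ↔ (pvPf xs k < xs.sum + x - B) := by omega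
          have hpar : ((((xs.length+1:Nat)):Int) - (k:Int)) % 2 = 0 ↔ k % 2 = 1 := by omega
          rcases Nat.mod_two_eq_zero_or_one k with hke | hke <;>
            by_cases h1 : xs.sum + x - B < pvPf xs k <;>
            by_cases h2 : pvPf xs k < xs.sum + x - B <;>
              simp [e1, e2, hke, h1, h2] <;> omega
        rw [hmod, if_neg hp, hEv, hOd, hTot, hcol]
        simp [add_assoc]

theorem pvB_eq_tot (A : List Int) (B : Int) : cntGoodSubArr_alt A B = pvTot A B := by
  unfold cntGoodSubArr_alt
  rw [pvB_fold A B]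

-- ===== VERDICT (by name: the statement is the Claim_ definition above) =====
theorem cntGoodSubArr_spec : Claim_equal_cntGoodSubArr := by
  intro A B _
  unfold Spec_cntGoodSubArr
  rw [pvA_eq_tot, pvB_eq_tot]
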